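-- pv_equiv track=rewrite | github.com/LinpgFoundation/linpg | linpg/core/coordinates.py | get_in_diamond_shaped
-- ===== SOURCE A (Python) =====
-- def get_in_diamond_shaped(_x: int, _y: int, _radius: int) -> list[tuple[int, int]]:
--     if _radius == 1:
--         return [(_x, _y)]
--     elif _radius > 1:
--         return [
--             (x, y)
--             for y in range(_y - _radius + 1, _y + _radius)
--             for x in range(_x - _radius + abs(y - _y) + 1, _x + _radius - abs(y - _y))
--         ]
--     return []
-- ===== SOURCE B (Python) =====
-- def get_in_diamond_shaped(_x: int, _y: int, _radius: int) -> list[tuple[int, int]]: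
--     r = _radius - 1
--     return [
--         (_x + dx, _y + dy)
--         for dy in range(-r, r + 1)
--         for dx in range(-r, r + 1)
--         if abs(dx) + abs(dy) <= r
--     ]
-- ===== Notes on version B (the rewrite author's own statement) =====
-- stated objective: simpler
-- what changed: B filters the full (2r-1)x(2r-1) bounding box by the Manhattan-distance condition |dx|+|dy| <= radius-1 instead of computing exact per-row x-bounds, and drops A's redundant radius==1 special case (non-positive radius yields [] via empty ranges).
import Mathlib
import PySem

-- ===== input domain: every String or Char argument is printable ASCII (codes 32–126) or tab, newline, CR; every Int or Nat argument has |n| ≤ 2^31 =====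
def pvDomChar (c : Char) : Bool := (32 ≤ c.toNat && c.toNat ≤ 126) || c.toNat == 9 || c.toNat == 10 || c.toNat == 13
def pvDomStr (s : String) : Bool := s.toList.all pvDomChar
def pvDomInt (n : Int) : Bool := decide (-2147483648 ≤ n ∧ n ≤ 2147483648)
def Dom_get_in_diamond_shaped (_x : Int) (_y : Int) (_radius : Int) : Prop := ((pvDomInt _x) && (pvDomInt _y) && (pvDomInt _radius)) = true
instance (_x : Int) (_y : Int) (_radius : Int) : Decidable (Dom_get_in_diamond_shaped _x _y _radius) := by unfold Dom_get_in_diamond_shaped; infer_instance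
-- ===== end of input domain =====

-- B filters the full bounding box by the Manhattan-distance condition instead of
-- computing per-row x-bounds, and drops A's redundant radius==1 special case (simpler).


-- ===== PORT A =====
def get_in_diamond_shaped (_x : Int) (_y : Int) (_radius : Int) : List (Int × Int) :=
  if _radius == 1 then [(_x, _y)]
  else if _radius > 1 then
    (PySem.List.pyRange (_y - _radius + 1) (_y + _radius) 1).flatMap (fun y =>
      (PySem.List.pyRange (_x - _radius + |y - _y| + 1) (_x + _radius - |y - _y|) 1).map
        (fun x => (x, y)))
  else []

-- ===== PORT B =====
def get_in_diamond_shaped_alt (_x : Int) (_y : Int) (_radius : Int) : List (Int × Int) :=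
  let r := _radius - 1
  (PySem.List.pyRange (-r) (r + 1) 1).flatMap (fun dy =>
    ((PySem.List.pyRange (-r) (r + 1) 1).filter (fun dx => |dx| + |dy| ≤ r)).map
      (fun dx => (_x + dx, _y + dy)))

-- ===== PRECONDITION & SPEC =====
def Spec_get_in_diamond_shaped (_x : Int) (_y : Int) (_radius : Int) (out : List (Int × Int)) : Prop := out = get_in_diamond_shaped_alt _x _y _radius
instance (_x : Int) (_y : Int) (_radius : Int) (out : List (Int × Int)) : Decidable (Spec_get_in_diamond_shaped _x _y _radius out) := by unfold Spec_get_in_diamond_shaped; infer_instance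

-- ===== CLAIM (what is proved, stated in full; the proofs are below) =====
def Claim_equal_get_in_diamond_shaped : Prop := ∀ (_x : Int) (_y : Int) (_radius : Int), Dom_get_in_diamond_shaped _x _y _radius → Spec_get_in_diamond_shaped _x _y _radius (get_in_diamond_shaped _x _y _radius)

-- ===== LEMMAS AND PROOFS =====

/-- Filtering a unit-step range by a predicate that describes the interval [lo, hi)
yields the clipped range. -/
theorem pyRange_filter (p : Int → Bool) (lo hi : Int)
    (hp : ∀ x : Int, p x = true ↔ lo ≤ x ∧ x < hi) (a b : Int) :
    (PySem.List.pyRange a b 1).filter p = PySem.List.pyRange (max a lo) (min b hi) 1 := by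
  by_cases hab : b ≤ a
  · rw [PySem.List.pyRange_one_eq_nil hab,
      PySem.List.pyRange_one_eq_nil (show min b hi ≤ max a lo by omega)]
    rfl
  · push Not at hab
    rw [PySem.List.pyRange_one_cons hab, List.filter_cons,
      pyRange_filter p lo hi hp (a + 1) b]
    by_cases hpa : p a = true
    · obtain ⟨h1, h2⟩ := (hp a).mp hpa
      rw [if_pos hpa, show max (a + 1) lo = a + 1 by omega, show max a lo = a by omega,
        PySem.List.pyRange_one_cons (show a < min b hi by omega)]
    · have hna : ¬(lo ≤ a ∧ a < hi) := fun h => hpa ((hp a).mpr h)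
      rw [if_neg hpa]
      by_cases hlo : a < lo
      · rw [show max (a + 1) lo = max a lo by omega]
      · rw [PySem.List.pyRange_one_eq_nil (show min b hi ≤ max (a + 1) lo by omega),
          PySem.List.pyRange_one_eq_nil (show min b hi ≤ max a lo by omega)]
  termination_by (b - a).toNat
  decreasing_by omega

theorem pyRange_shift (c a b : Int) :
    PySem.List.pyRange (c + a) (c + b) 1 = (PySem.List.pyRange a b 1).map (fun t => c + t) := by
  rw [PySem.List.pyRange_one, PySem.List.pyRange_one, List.map_map,
    show c + b - (c + a) = b - a by ring]
  exact List.map_congr_left (fun k _ => by simp [Function.comp]; ring)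

theorem flatMap_congr_mem {α β : Type} (l : List α) (f g : α → List β)
    (h : ∀ x ∈ l, f x = g x) : l.flatMap f = l.flatMap g := by
  induction l with
  | nil => rfl
  | cons a t ih =>
    simp only [List.flatMap_cons]
    rw [h a (List.mem_cons_self), ih (fun x hx => h x (List.mem_cons_of_mem a hx))]

/-- B equals A's general (radius > 1) comprehension, for every radius. -/
theorem alt_eq_rows (_x _y _radius : Int) :
    get_in_diamond_shaped_alt _x _y _radius =
    (PySem.List.pyRange (_y - _radius + 1) (_y + _radius) 1).flatMap (fun y =>
      (PySem.List.pyRange (_x - _radius + |y - _y| + 1) (_x + _radius - |y - _y|) 1).map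
        (fun x => (x, y))) := by
  unfold get_in_diamond_shaped_alt
  rw [show _y - _radius + 1 = _y + (-(_radius - 1)) by ring,
    show _y + _radius = _y + ((_radius - 1) + 1) by ring,
    pyRange_shift _y (-(_radius - 1)) ((_radius - 1) + 1), List.flatMap_map]
  apply flatMap_congr_mem
  intro dy hdy
  rw [PySem.List.mem_pyRange_one] at hdy
  have hdyb : |dy| ≤ _radius - 1 := by
    rcases abs_cases dy with ⟨h1, _⟩ | ⟨h1, _⟩ <;> omega
  rw [pyRange_filter (fun dx => decide (|dx| + |dy| ≤ _radius - 1))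
      (-(_radius - 1 - |dy|)) (_radius - |dy|)
      (fun x => by
        simp only [decide_eq_true_eq]
        rcases abs_cases x with ⟨h1, h2⟩ | ⟨h1, h2⟩ <;> omega)]
  rw [show max (-(_radius - 1)) (-(_radius - 1 - |dy|)) = -(_radius - 1 - |dy|) by
      have := abs_nonneg dy; omega,
    show min ((_radius - 1) + 1) (_radius - |dy|) = _radius - |dy| by
      have := abs_nonneg dy; omega]
  rw [show _x - _radius + |_y + dy - _y| + 1 = _x + (-(_radius - 1 - |dy|)) by
      rw [add_sub_cancel_left]; ring,
    show _x + _radius - |_y + dy - _y| = _x + (_radius - |dy|) by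
      rw [add_sub_cancel_left]; ring,
    pyRange_shift _x (-(_radius - 1 - |dy|)) (_radius - |dy|), List.map_map]
  rfl

theorem ports_agree (_x _y _radius : Int) :
    get_in_diamond_shaped _x _y _radius = get_in_diamond_shaped_alt _x _y _radius := by
  unfold get_in_diamond_shaped
  by_cases h1 : _radius = 1
  · subst h1
    rw [alt_eq_rows _x _y 1]
    simp only [beq_self_eq_true, if_true]
    rw [show _y - 1 + 1 = _y by ring, PySem.List.pyRange_one_singleton]
    simp only [List.flatMap_cons, List.flatMap_nil, List.append_nil, sub_self, abs_zero]
    rw [show _x - 1 + 0 + 1 = _x by ring, show _x + 1 - 0 = _x + 1 by ring,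
      PySem.List.pyRange_one_singleton]
    simp
  · by_cases h2 : _radius > 1
    · rw [alt_eq_rows _x _y _radius]
      simp [h1, h2]
    · have hr : _radius ≤ 0 := by omega
      simp only [get_in_diamond_shaped_alt]
      rw [PySem.List.pyRange_one_eq_nil (show _radius - 1 + 1 ≤ -(_radius - 1) by omega)]
      simp [h1, h2]

-- ===== VERDICT (by name: the statement is the Claim_ definition above) =====
theorem get_in_diamond_shaped_spec : Claim_equal_get_in_diamond_shaped := by
  intro _x _y _radius _hd
  unfold Spec_get_in_diamond_shaped
  exact ports_agree _x _y _radius
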